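-- pv_equiv track=rewrite | github.com/eqchee/LCBS | Longest Common Bitonic Subsequence.py | LCBS
-- ===== SOURCE A (Python) =====
-- def LCBS(a, b):
--     #filter the hexadecimals that are common to the 2 given sequences
--     a, b = [int(i,16) for i in a if i in b], [int(i,16) for i in b if i in a]
--     #set n to be the length of sequence a and m to be the length of sequence b
--     n , m = len(a), len(b)
--     #create a table to save the length of the longest common increasing subsequence
--     front = [0] * m
--     #create a table to save the length of the longest common decreasing subsequence
--     back = [0] * m
--     #create a table to save the length of the longest common bitonic subsequence
--     result = [0] * m
--
--     for i in range(n):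
--         #create counter to save the longest common increasing subsequence found thus far
--         fcounter = 0
--         #create counter to save the longest common decreasing subsequence found thus far
--         dcounter = 0
--         for j in range(m):
--             #when common elements are found from the front of both sequences
--             if (a[i] == b[j]):
--                 front[j] = max(front[j], fcounter+1)
--             if a[i] > b[j]:
--                 fcounter = max(front[j], fcounter)
--             #when common elements are found from the rear of both sequences
--             x = n-1-i
--             y = m-1-j
--             if (a[x] == b[y]):
--                 back[y] = max(back[y], dcounter+1)
--             if a[x] > b[y]:
--                 dcounter = max(back[y], dcounter)
--     #add the length of the longest common increasing and decreasing subsequence and deduct 1 to account for the duplication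
--     for i in range(len(front)):
--         result[i] = front[i] + back[i] - 1
--     return max(result)
-- ===== SOURCE B (Python) =====
-- def LCBS(a, b):
--     a, b = [int(i, 16) for i in a if i in b], [int(i, 16) for i in b if i in a]
--     m = len(b)
--
--     def best_below(dp, x, ks):
--         # best already-achieved length among candidate predecessors smaller than x
--         return max([dp[k] for k in ks if b[k] < x], default=0)
--
--     front = [0] * m
--     for x in a:
--         front = [max(front[j], 1 + best_below(front, x, range(j))) if b[j] == x else front[j]
--                  for j in range(m)]
--     back = [0] * m
--     for x in reversed(a):
--         back = [max(back[j], 1 + best_below(back, x, range(j + 1, m))) if b[j] == x else back[j]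
--                 for j in range(m)]
--     return max(f + g - 1 for f, g in zip(front, back))
-- ===== Notes on version B (the rewrite author's own statement) =====
-- stated objective: alternative
-- what changed: A's fused double loop with running fcounter/dcounter accumulators and hand-maintained mirror indices n-1-i, m-1-j is replaced by a direct definitional DP: each row is rebuilt functionally by a comprehension that, at position j, takes 1 + the explicit maximum over smaller predecessors (range(j) for the increasing part, range(j+1,m) for the decreasing part), trading the O(n*m) running-max mechanism for an O(n*m^2) direct max scan that states the recurrence literally.
import Mathlib
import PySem

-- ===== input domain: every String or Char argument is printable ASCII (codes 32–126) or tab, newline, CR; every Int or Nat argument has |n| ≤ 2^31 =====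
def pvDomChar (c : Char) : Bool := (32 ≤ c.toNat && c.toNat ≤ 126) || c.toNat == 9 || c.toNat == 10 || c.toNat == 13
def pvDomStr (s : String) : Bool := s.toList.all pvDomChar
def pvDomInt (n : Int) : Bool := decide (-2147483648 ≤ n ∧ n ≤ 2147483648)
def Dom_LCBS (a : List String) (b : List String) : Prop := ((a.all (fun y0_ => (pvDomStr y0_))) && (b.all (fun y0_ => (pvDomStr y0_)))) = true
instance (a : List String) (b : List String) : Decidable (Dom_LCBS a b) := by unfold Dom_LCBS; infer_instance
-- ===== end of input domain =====

-- B replaces A's fused double loop with running fcounter/dcounter accumulators by a direct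
-- definitional DP that rebuilds each row functionally, taking at position j an explicit maximum
-- over smaller predecessors (an O(n·m²) direct scan instead of A's O(n·m) running counter);
-- objective: alternative.

-- ===== PORT A =====
-- int(i, 16); Pre_LCBS guarantees the parse succeeds on every converted string (ValueError otherwise)
def pvHex (s : String) : Int := (PySem.Int.ofStrBase? s 16).getD 0

-- one inner-loop step on (front, fcounter); indices produced by range(m) are nonnegative, so Nat
def stepFrontA (bv : List Int) (x : Int) (s : List Int × Int) (j : Nat) : List Int × Int :=
  let front := if x = bv.getD j 0 then s.1.set j (max (s.1.getD j 0) (s.2 + 1)) else s.1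
  (front, if bv.getD j 0 < x then max (front.getD j 0) s.2 else s.2)

-- one inner-loop step on (back, dcounter) at y = m-1-j (j < m, so Nat subtraction is exact)
def stepBackA (bv : List Int) (x : Int) (s : List Int × Int) (j : Nat) : List Int × Int :=
  let y := bv.length - 1 - j
  let back := if x = bv.getD y 0 then s.1.set y (max (s.1.getD y 0) (s.2 + 1)) else s.1
  (back, if bv.getD y 0 < x then max (back.getD y 0) s.2 else s.2)

-- max(result) raises ValueError on an empty list (excluded by Pre_LCBS); the port defaults to 0 there
def LCBS (a : List String) (b : List String) : Int :=
  let av := (a.filter (fun i => b.contains i)).map pvHex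
  let bv := (b.filter (fun i => a.contains i)).map pvHex
  let n := av.length
  let m := bv.length
  let fb := (List.range n).foldl
    (fun (fb : List Int × List Int) i =>
      let st := (List.range m).foldl
        (fun (s : (List Int × Int) × (List Int × Int)) j =>
          (stepFrontA bv (av.getD i 0) s.1 j, stepBackA bv (av.getD (n - 1 - i) 0) s.2 j))
        ((fb.1, 0), (fb.2, 0))
      (st.1.1, st.2.1))
    (List.replicate m 0, List.replicate m 0)
  ((PySem.List.max? ((List.range m).map (fun i => fb.1.getD i 0 + fb.2.getD i 0 - 1)) (fun v => v))).getD 0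

-- ===== PORT B =====
-- best_below(dp, x, ks): max([dp[k] for k in ks if b[k] < x], default=0)
def bestBelow (bv : List Int) (dp : List Int) (x : Int) (ks : List Nat) : Int :=
  (PySem.List.max? ((ks.filter (fun k => bv.getD k 0 < x)).map (fun k => dp.getD k 0)) (fun v => v)).getD 0

-- one front row rebuild: the comprehension over range(m) with predecessor scan range(j)
def growFront (bv : List Int) (dp : List Int) (x : Int) : List Int :=
  (List.range bv.length).map (fun j =>
    if bv.getD j 0 = x then max (dp.getD j 0) (1 + bestBelow bv dp x (List.range j))
    else dp.getD j 0)

-- one back row rebuild: successor scan range(j+1, m), ported as List.range' (j+1) (m-(j+1))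
def growBack (bv : List Int) (dp : List Int) (x : Int) : List Int :=
  (List.range bv.length).map (fun j =>
    if bv.getD j 0 = x then
      max (dp.getD j 0) (1 + bestBelow bv dp x (List.range' (j + 1) (bv.length - (j + 1))))
    else dp.getD j 0)

-- max(...) on the empty generator raises ValueError (excluded by Pre_LCBS); the port defaults to 0
def LCBS_alt (a : List String) (b : List String) : Int :=
  let av := (a.filter (fun i => b.contains i)).map pvHex
  let bv := (b.filter (fun i => a.contains i)).map pvHex
  let m := bv.length
  let front := av.foldl (fun dp x => growFront bv dp x) (List.replicate m 0)
  let back := av.reverse.foldl (fun dp x => growBack bv dp x) (List.replicate m 0)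
  (PySem.List.max? ((front.zip back).map (fun p => p.1 + p.2 - 1)) (fun v => v)).getD 0

-- ===== PRECONDITION & SPEC =====
-- Pre_ = exactly where Python A returns: some string common to both lists exists (else max([])
-- raises ValueError) and every common string parses as int(s, 16) (else ValueError)
def Pre_LCBS (a : List String) (b : List String) : Prop :=
  (∃ s, s ∈ a ∧ s ∈ b) ∧ ∀ s, s ∈ a → s ∈ b → (PySem.Int.ofStrBase? s 16).isSome = true
instance (a : List String) (b : List String) : Decidable (Pre_LCBS a b) := by unfold Pre_LCBS; infer_instance

def pvWitness_LCBS : List String × List String := (["a", "3"], ["3", "1f", "a"])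

def Spec_LCBS (a : List String) (b : List String) (out : Int) : Prop := out = LCBS_alt a b
instance (a : List String) (b : List String) (out : Int) : Decidable (Spec_LCBS a b out) := by unfold Spec_LCBS; infer_instance

-- ===== CLAIM (what is proved, stated in full; the proofs are below) =====
def Claim_equal_LCBS : Prop := ∀ (a : List String) (b : List String), Dom_LCBS a b → Pre_LCBS a b → Spec_LCBS a b (LCBS a b)

-- ===== LEMMAS AND PROOFS =====

-- proof-side twin of A's inner row update (the previous-row values never feed the counter,
-- because an update happens only at positions equal to x while the counter reads positions < x)
def lcisInner (x : Int) : List Int → List Int → Int → List Int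
  | y :: bs, d :: ds, c =>
      if x = y then max d (c + 1) :: lcisInner x bs ds c
      else if y < x then d :: lcisInner x bs ds (max c d)
      else d :: lcisInner x bs ds c
  | _, _, _ => []

def lcis (av : List Int) (bv : List Int) : List Int :=
  av.foldl (fun dp x => lcisInner x bv dp 0) (List.replicate bv.length 0)

-- final value of the fcounter/dcounter accumulator along one row
def cAux (x : Int) : List Int → List Int → Int → Int
  | y :: bs, d :: ds, c =>
      if x = y then cAux x bs ds c
      else if y < x then cAux x bs ds (max c d)
      else cAux x bs ds c
  | _, _, c => c

theorem length_lcisInner (x : Int) (bs ds : List Int) (c : Int) (h : ds.length = bs.length) :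
    (lcisInner x bs ds c).length = bs.length := by
  induction bs generalizing ds c with
  | nil => simp [lcisInner]
  | cons y bs ih =>
    cases ds with
    | nil => simp at h
    | cons d ds =>
      simp only [List.length_cons, Nat.add_right_cancel_iff] at h
      unfold lcisInner
      split_ifs <;> simp [ih _ _ h]

theorem nonneg_lcisInner (x : Int) (bs ds : List Int) (c : Int)
    (h : ∀ v ∈ ds, 0 ≤ v) : ∀ v ∈ lcisInner x bs ds c, 0 ≤ v := by
  induction bs generalizing ds c with
  | nil => simp [lcisInner]
  | cons y bs ih =>
    cases ds with
    | nil => simp [lcisInner]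
    | cons d ds =>
      have hd : 0 ≤ d := h d (by simp)
      have ht : ∀ v ∈ ds, 0 ≤ v := fun v hv => h v (by simp [hv])
      unfold lcisInner
      split_ifs with h1 h2
      · intro v hv
        rcases List.mem_cons.mp hv with h' | h'
        · subst h'; exact le_trans hd (le_max_left _ _)
        · exact ih ds c ht v h'
      · intro v hv
        rcases List.mem_cons.mp hv with h' | h'
        · subst h'; exact hd
        · exact ih ds (max c d) ht v h'
      · intro v hv
        rcases List.mem_cons.mp hv with h' | h'
        · subst h'; exact hd
        · exact ih ds c ht v h'

theorem getD_reverse (l : List Int) (j : Nat) (h : j < l.length) (d : Int) :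
    l.reverse.getD j d = l.getD (l.length - 1 - j) d := by
  rw [List.getD_eq_getElem _ _ (by simpa using h), List.getD_eq_getElem _ _ (by omega),
    List.getElem_reverse]

theorem reverse_set (l : List Int) (n : Nat) (a : Int) (h : n < l.length) :
    (l.set n a).reverse = l.reverse.set (l.length - 1 - n) a := by
  apply List.ext_getElem
  · simp
  intro i hi hj
  simp only [List.length_reverse, List.length_set] at hi hj
  rw [List.getElem_reverse, List.getElem_set, List.getElem_set, List.getElem_reverse]
  simp only [List.length_set]
  by_cases h1 : n = l.length - 1 - i
  · rw [if_pos h1, if_pos (by omega)]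
  · rw [if_neg h1, if_neg (by omega)]

theorem getD_map_range_self (xs : List Int) :
    (List.range xs.length).map (fun i => xs.getD i 0) = xs := by
  apply List.ext_getElem
  · simp
  intro i hi hj
  simp only [List.getElem_map, List.getElem_range]
  rw [List.getD_eq_getElem _ _ (by simpa using hi)]

-- A's inner front loop, started at column k on the suffix b of L, is lcisInner on that suffix
theorem frontFold (x : Int) (L : List Int) (b : List Int) : ∀ (k : Nat) (pre dp : List Int) (c : Int),
    L.drop k = b → pre.length = k → dp.length = b.length →
    (List.range b.length).foldl (fun s j => stepFrontA L x s (k + j)) (pre ++ dp, c)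
      = (pre ++ lcisInner x b dp c, cAux x b dp c) := by
  induction b with
  | nil =>
    intro k pre dp c _ _ hdp
    simp only [List.length_nil] at hdp
    rw [List.length_eq_zero_iff] at hdp
    subst hdp
    simp [lcisInner, cAux]
  | cons y bs ih =>
    intro k pre dp c hdrop hpre hdp
    cases dp with
    | nil => simp at hdp
    | cons d ds =>
      simp only [List.length_cons, Nat.add_right_cancel_iff] at hdp
      have hy : L.getD k 0 = y := by
        have := congrArg (fun l => l.getD 0 0) hdrop
        simpa [List.getD, List.getElem?_drop] using this
      have hdropS : L.drop (k + 1) = bs := by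
        have : L.drop (k+1) = (L.drop k).drop 1 := by
          rw [List.drop_drop]
        rw [this, hdrop]; simp
      have hgetd : (pre ++ d :: ds).getD k 0 = d := by
        subst hpre
        have : (pre ++ d :: ds).getD (pre.length + 0) 0 = (d :: ds).getD 0 0 := by
          simp [List.getD]
        simpa using this
      have hset : ∀ v : Int, (pre ++ d :: ds).set k v = pre ++ v :: ds := by
        intro v; subst hpre
        have : (pre ++ d :: ds).set (pre.length + 0) v = pre ++ (d :: ds).set 0 v := by
          simp
        simpa using this
      simp only [List.length_cons]
      rw [List.range_succ_eq_map, List.foldl_cons, List.foldl_map]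
      have hfun : (fun (s : List Int × Int) (j : Nat) => stepFrontA L x s (k + Nat.succ j))
          = (fun s j => stepFrontA L x s ((k + 1) + j)) := by
        funext s j
        congr 1
        omega
      rw [hfun]
      have hstep1 : ∀ (st : List Int × Int), stepFrontA L x st (k + 0) =
          (if x = y then st.1.set k (max (st.1.getD k 0) (st.2 + 1)) else st.1,
           if y < x then max ((if x = y then st.1.set k (max (st.1.getD k 0) (st.2 + 1)) else st.1).getD k 0) st.2 else st.2) := by
        intro st
        simp only [stepFrontA, Nat.add_zero, hy]
      by_cases h1 : x = y
      · rw [hstep1]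
        simp only [if_pos h1, if_neg (show ¬ y < x by omega), hgetd, hset]
        have := ih (k+1) (pre ++ [max d (c+1)]) ds c hdropS (by simp [hpre]) hdp
        simp only [List.append_assoc, List.singleton_append] at this
        rw [this]
        simp [lcisInner, cAux, h1]
      · by_cases h2 : y < x
        · rw [hstep1]
          simp only [if_neg h1, if_pos h2, hgetd]
          rw [max_comm d c]
          have := ih (k+1) (pre ++ [d]) ds (max c d) hdropS (by simp [hpre]) hdp
          simp only [List.append_assoc, List.singleton_append] at this
          rw [this]
          simp [lcisInner, cAux, h1, h2]
        · rw [hstep1]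
          simp only [if_neg h1, if_neg h2]
          have := ih (k+1) (pre ++ [d]) ds c hdropS (by simp [hpre]) hdp
          simp only [List.append_assoc, List.singleton_append] at this
          rw [this]
          simp [lcisInner, cAux, h1, h2]

-- one back step is one front step on the reversed row
theorem stepBack_eq (bv : List Int) (x : Int) (dp : List Int) (c : Int) (j : Nat)
    (hj : j < bv.length) (hdp : dp.length = bv.length) :
    stepBackA bv x (dp, c) j = Prod.map List.reverse id (stepFrontA bv.reverse x (dp.reverse, c) j) := by
  have hy : j < dp.length := by omega
  have h1 : bv.reverse.getD j 0 = bv.getD (bv.length - 1 - j) 0 := getD_reverse bv j hj 0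
  have h2 : dp.reverse.getD j 0 = dp.getD (bv.length - 1 - j) 0 := by
    rw [getD_reverse dp j hy 0, hdp]
  have h3 : ∀ v : Int, dp.reverse.set j v = (dp.set (bv.length - 1 - j) v).reverse := by
    intro v
    rw [reverse_set dp (bv.length - 1 - j) v (by omega)]
    congr 1
    omega
  simp only [stepBackA, stepFrontA, h1, h2, h3]
  by_cases hc : x = bv.getD (bv.length - 1 - j) 0
  · simp only [if_pos hc, Prod.map, Prod.mk.injEq]
    refine ⟨?_, ?_⟩
    · simp
    · by_cases hlt : bv.getD (bv.length - 1 - j) 0 < x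
      · rw [if_pos hlt, if_pos hlt]
        congr 1
        rw [getD_reverse _ j (by simp; omega) 0]
        simp only [List.length_set]
        rw [hdp]
      · rw [if_neg hlt, if_neg hlt]; rfl
  · simp only [if_neg hc, Prod.map, Prod.mk.injEq]
    refine ⟨?_, ?_⟩
    · simp
    · by_cases hlt : bv.getD (bv.length - 1 - j) 0 < x
      · rw [if_pos hlt, if_pos hlt, h2]; rfl
      · rw [if_neg hlt, if_neg hlt]; rfl

theorem backSim (bv : List Int) (x : Int) : ∀ (l : List Nat), (∀ j ∈ l, j < bv.length) →
    ∀ (dp : List Int) (c : Int), dp.length = bv.length →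
    l.foldl (stepBackA bv x) (dp, c)
      = Prod.map List.reverse id (l.foldl (fun s j => stepFrontA bv.reverse x s j) (dp.reverse, c)) := by
  intro l
  induction l with
  | nil => intro _ dp c _; simp
  | cons j l ih =>
    intro hmem dp c hdp
    simp only [List.foldl_cons]
    rw [stepBack_eq bv x dp c j (hmem j (by simp)) hdp]
    set t := stepFrontA bv.reverse x (dp.reverse, c) j with ht
    have h1 : Prod.map List.reverse id t = (t.1.reverse, t.2) := rfl
    rw [h1]
    have hlen : t.1.reverse.length = bv.length := by
      rw [ht]
      simp only [List.length_reverse]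
      have := congrArg Prod.fst ht
      simp only [stepFrontA] at *
      split_ifs <;> simp [hdp]
    rw [ih (fun j hj => hmem j (by simp [hj])) t.1.reverse t.2 hlen]
    simp

theorem innerFront (bv : List Int) (x : Int) (dp : List Int) (c : Int) (h : dp.length = bv.length) :
    (List.range bv.length).foldl (stepFrontA bv x) (dp, c) = (lcisInner x bv dp c, cAux x bv dp c) := by
  have hfun : stepFrontA bv x = fun s j => stepFrontA bv x s (0 + j) := by
    funext s j; rw [Nat.zero_add]
  rw [hfun]
  have := frontFold x bv bv 0 [] dp c (by simp) rfl h
  simpa using this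

theorem innerBack (bv : List Int) (x : Int) (dp : List Int) (c : Int) (h : dp.length = bv.length) :
    (List.range bv.length).foldl (stepBackA bv x) (dp, c)
      = ((lcisInner x bv.reverse dp.reverse c).reverse, cAux x bv.reverse dp.reverse c) := by
  rw [backSim bv x (List.range bv.length) (by simp) dp c h]
  have h2 : dp.reverse.length = bv.reverse.length := by simp [h]
  have : (List.range bv.length).foldl (fun s j => stepFrontA bv.reverse x s j) (dp.reverse, c)
      = (List.range bv.reverse.length).foldl (stepFrontA bv.reverse x) (dp.reverse, c) := by
    simp
  rw [this, innerFront bv.reverse x dp.reverse c h2]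
  rfl

theorem foldl_lcisInner_length (bv : List Int) : ∀ (l : List Int) (init : List Int),
    init.length = bv.length → (l.foldl (fun dp x => lcisInner x bv dp 0) init).length = bv.length := by
  intro l
  induction l with
  | nil => intro init h; simpa using h
  | cons x l ih =>
    intro init h
    simp only [List.foldl_cons]
    exact ih _ (by rw [length_lcisInner x bv init 0 h])

theorem length_lcis (av bv : List Int) : (lcis av bv).length = bv.length := by
  unfold lcis
  exact foldl_lcisInner_length bv av _ (by simp)

theorem zip_map_eq (u v : List Int) (m : Nat) (hu : u.length = m) (hv : v.length = m) :
    (List.range m).map (fun i => u.getD i 0 + v.getD i 0 - 1)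
      = (u.zip v).map (fun p => p.1 + p.2 - 1) := by
  apply List.ext_getElem
  · simp [hu, hv]
  intro i hi hj
  simp only [List.getElem_map, List.getElem_range, List.getElem_zip]
  rw [List.getD_eq_getElem _ _ (by simp at hi; omega), List.getD_eq_getElem _ _ (by simp at hi; omega)]

theorem foldl_range_lcis (l : List Int) (bv2 : List Int) (init : List Int) :
    (List.range l.length).foldl (fun fr i => lcisInner (l.getD i 0) bv2 fr 0) init
      = l.foldl (fun dp x => lcisInner x bv2 dp 0) init := by
  conv_rhs => rw [← getD_map_range_self l]
  rw [List.foldl_map]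

theorem main_eq (av bv : List Int) :
    ((List.range av.length).foldl
      (fun (fb : List Int × List Int) i =>
        let st := (List.range bv.length).foldl
          (fun (s : (List Int × Int) × (List Int × Int)) j =>
            (stepFrontA bv (av.getD i 0) s.1 j, stepBackA bv (av.getD (av.length - 1 - i) 0) s.2 j))
          ((fb.1, 0), (fb.2, 0))
        (st.1.1, st.2.1))
      (List.replicate bv.length 0, List.replicate bv.length 0))
    = (lcis av bv, (lcis av.reverse bv.reverse).reverse) := by
  have hinner : ∀ (fb : List Int × List Int) (i : Nat),
      ((List.range bv.length).foldl
        (fun (s : (List Int × Int) × (List Int × Int)) j =>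
          (stepFrontA bv (av.getD i 0) s.1 j, stepBackA bv (av.getD (av.length - 1 - i) 0) s.2 j))
        ((fb.1, 0), (fb.2, 0)))
      = ((List.range bv.length).foldl (stepFrontA bv (av.getD i 0)) (fb.1, 0),
         (List.range bv.length).foldl (stepBackA bv (av.getD (av.length - 1 - i) 0)) (fb.2, 0)) := by
    intro fb i
    rw [PySem.List.foldl_prod_mk]
  have houter : (fun (fb : List Int × List Int) i =>
      let st := (List.range bv.length).foldl
        (fun (s : (List Int × Int) × (List Int × Int)) j =>
          (stepFrontA bv (av.getD i 0) s.1 j, stepBackA bv (av.getD (av.length - 1 - i) 0) s.2 j))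
        ((fb.1, 0), (fb.2, 0))
      (st.1.1, st.2.1))
      = (fun (fb : List Int × List Int) i =>
          (((List.range bv.length).foldl (stepFrontA bv (av.getD i 0)) (fb.1, 0)).1,
           ((List.range bv.length).foldl (stepBackA bv (av.getD (av.length - 1 - i) 0)) (fb.2, 0)).1)) := by
    funext fb i
    simp only [hinner fb i]
  rw [houter]
  rw [PySem.List.foldl_prod_mk
    (f := fun fr i => ((List.range bv.length).foldl (stepFrontA bv (av.getD i 0)) (fr, 0)).1)
    (g := fun bk i => ((List.range bv.length).foldl (stepBackA bv (av.getD (av.length - 1 - i) 0)) (bk, 0)).1)]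
  have hF : ∀ (l : List Nat) (fr : List Int), fr.length = bv.length →
      l.foldl (fun fr i => ((List.range bv.length).foldl (stepFrontA bv (av.getD i 0)) (fr, 0)).1) fr
      = l.foldl (fun fr i => lcisInner (av.getD i 0) bv fr 0) fr := by
    intro l
    induction l with
    | nil => intro fr _; rfl
    | cons i l ih =>
      intro fr h
      simp only [List.foldl_cons, innerFront bv (av.getD i 0) fr 0 h]
      exact ih _ (by rw [length_lcisInner _ _ _ _ h])
  have hG : ∀ (l : List Nat) (bk : List Int), bk.length = bv.length →
      l.foldl (fun bk i => ((List.range bv.length).foldl (stepBackA bv (av.getD (av.length - 1 - i) 0)) (bk, 0)).1) bk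
      = l.foldl (fun bk i => (lcisInner (av.getD (av.length - 1 - i) 0) bv.reverse bk.reverse 0).reverse) bk := by
    intro l
    induction l with
    | nil => intro bk _; rfl
    | cons i l ih =>
      intro bk h
      simp only [List.foldl_cons, innerBack bv (av.getD (av.length - 1 - i) 0) bk 0 h]
      refine ih _ ?_
      rw [List.length_reverse, length_lcisInner _ _ _ _ (by simp [h]), List.length_reverse]
  simp only [Prod.mk.injEq]
  constructor
  · rw [hF (List.range av.length) _ (by simp)]
    rw [foldl_range_lcis av bv]
    rfl
  · rw [hG (List.range av.length) _ (by simp)]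
    have hcongr : List.foldl
        (fun (bk : List Int) i => (lcisInner (av.getD (av.length - 1 - i) 0) bv.reverse bk.reverse 0).reverse)
        (List.replicate bv.length 0) (List.range av.length)
        = List.foldl (fun bk i => (lcisInner (av.reverse.getD i 0) bv.reverse bk.reverse 0).reverse)
        (List.replicate bv.length 0) (List.range av.length) :=
      PySem.List.foldl_congr_mem _ _ _ _ (fun bk i hi => by rw [← getD_reverse av i (List.mem_range.mp hi) 0])
    rw [hcongr]
    rw [show (List.replicate bv.length (0:Int)) = (List.replicate bv.length (0:Int)).reverse from
      List.reverse_replicate.symm]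
    rw [List.foldl_hom List.reverse
      (g₁ := fun dp i => lcisInner (av.reverse.getD i 0) bv.reverse dp 0)
      (fun a i => by simp)]
    congr 1
    rw [show List.range av.length = List.range av.reverse.length by simp]
    rw [foldl_range_lcis av.reverse bv.reverse]
    unfold lcis
    congr 1
    simp

-- ===== B-side lemmas: the direct-max comprehension equals the running-counter row =====

-- Python max(l, default=0) on a nonnegative list is the running max from 0
theorem maxD0_eq_foldl (l : List Int) (h : ∀ v ∈ l, 0 ≤ v) :
    (PySem.List.max? l (fun v => v)).getD 0 = l.foldl max 0 := by
  cases l with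
  | nil => simp [PySem.List.max?]
  | cons x t =>
    rw [PySem.List.max?_id_cons]
    simp only [Option.getD_some, List.foldl_cons]
    congr 1
    exact (max_eq_right (h x (by simp))).symm

theorem bestBelow_eq_foldl (bv dp : List Int) (x : Int) (ks : List Nat)
    (h : ∀ v ∈ dp, 0 ≤ v) :
    bestBelow bv dp x ks = ((ks.filter (fun k => bv.getD k 0 < x)).map (fun k => dp.getD k 0)).foldl max 0 := by
  unfold bestBelow
  apply maxD0_eq_foldl
  intro v hv
  rcases List.mem_map.mp hv with ⟨k, _, rfl⟩
  by_cases hk : k < dp.length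
  · rw [List.getD_eq_getElem _ _ hk]
    exact h _ (List.getElem_mem hk)
  · rw [List.getD_eq_default _ _ (by omega)]

-- candidate-list step: appending index j to the scan
theorem bestBelow_succ (bv dp : List Int) (x : Int) (j : Nat) (hnn : ∀ v ∈ dp, 0 ≤ v) :
    bestBelow bv dp x (List.range (j + 1))
      = if bv.getD j 0 < x then max (bestBelow bv dp x (List.range j)) (dp.getD j 0)
        else bestBelow bv dp x (List.range j) := by
  rw [bestBelow_eq_foldl _ _ _ _ hnn, bestBelow_eq_foldl _ _ _ _ hnn, List.range_succ]
  by_cases h : bv.getD j 0 < x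
  · rw [List.filter_append, List.filter_singleton]
    simp only [h, decide_true, if_pos]
    rw [List.map_append, List.foldl_append]
    simp
  · rw [List.filter_append, List.filter_singleton]
    simp only [h, decide_false]
    simp

-- the B row comprehension, restricted to columns from j0 on, equals A's counter recursion
theorem lcisInner_eq_map (x : Int) (bv dp : List Int) (hnn : ∀ v ∈ dp, 0 ≤ v) :
    ∀ (bs ds : List Int) (j0 : Nat), bv.drop j0 = bs → dp.drop j0 = ds → dp.length = bv.length →
    lcisInner x bs ds (bestBelow bv dp x (List.range j0))
      = (List.range' j0 bs.length).map (fun j =>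
          if bv.getD j 0 = x then max (dp.getD j 0) (1 + bestBelow bv dp x (List.range j))
          else dp.getD j 0) := by
  intro bs
  induction bs with
  | nil => intro ds j0 _ _ _; cases ds <;> simp [lcisInner]
  | cons y bs ih =>
    intro ds j0 hb hd hlen
    have hj0 : j0 < bv.length := by
      by_contra h
      rw [List.drop_eq_nil_of_le (by omega)] at hb
      exact List.cons_ne_nil _ _ hb.symm
    cases ds with
    | nil =>
      exfalso
      have := congrArg List.length hd
      simp [hlen] at this
      have := congrArg List.length hb
      simp at this
      omega
    | cons d ds =>
      have hy : bv.getD j0 0 = y := by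
        have := congrArg (fun l => l.getD 0 0) hb
        simpa [List.getD, List.getElem?_drop] using this
      have hdv : dp.getD j0 0 = d := by
        have := congrArg (fun l => l.getD 0 0) hd
        simpa [List.getD, List.getElem?_drop] using this
      have hbS : bv.drop (j0 + 1) = bs := by
        have : bv.drop (j0+1) = (bv.drop j0).drop 1 := by rw [List.drop_drop]
        rw [this, hb]; simp
      have hdS : dp.drop (j0 + 1) = ds := by
        have : dp.drop (j0+1) = (dp.drop j0).drop 1 := by rw [List.drop_drop]
        rw [this, hd]; simp
      have hstep := bestBelow_succ bv dp x j0 hnn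
      simp only [List.length_cons]
      rw [List.range'_succ, List.map_cons]
      unfold lcisInner
      by_cases h1 : x = y
      · rw [if_pos h1]
        have hcS : bestBelow bv dp x (List.range (j0 + 1)) = bestBelow bv dp x (List.range j0) := by
          rw [hstep, if_neg (by rw [hy]; omega)]
        rw [← hcS] at *
        rw [ih ds (j0+1) hbS hdS hlen]
        congr 1
        rw [if_pos (by rw [hy, ← h1]), hdv, hcS]
        rw [Int.add_comm 1 _]
      · rw [if_neg h1]
        by_cases h2 : y < x
        · rw [if_pos h2]
          have hcS : bestBelow bv dp x (List.range (j0 + 1))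
              = max (bestBelow bv dp x (List.range j0)) d := by
            rw [hstep, if_pos (by rw [hy]; exact h2), hdv]
          rw [← hcS]
          rw [ih ds (j0+1) hbS hdS hlen]
          congr 1
          rw [if_neg (by rw [hy]; exact fun hh => h1 hh.symm), hdv]
        · rw [if_neg h2]
          have hcS : bestBelow bv dp x (List.range (j0 + 1)) = bestBelow bv dp x (List.range j0) := by
            rw [hstep, if_neg (by rw [hy]; exact h2)]
          rw [← hcS]
          rw [ih ds (j0+1) hbS hdS hlen]
          congr 1
          rw [if_neg (by rw [hy]; exact fun hh => h1 hh.symm), hdv]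

theorem growFront_eq (bv dp : List Int) (x : Int) (hlen : dp.length = bv.length)
    (hnn : ∀ v ∈ dp, 0 ≤ v) : growFront bv dp x = lcisInner x bv dp 0 := by
  have h0 : bestBelow bv dp x (List.range 0) = 0 := by
    simp [bestBelow, PySem.List.max?]
  have := lcisInner_eq_map x bv dp hnn bv dp 0 (by simp) (by simp) hlen
  rw [h0] at this
  rw [growFront, this]
  congr 1
  rw [List.range_eq_range']

-- mirror identity: the back scan at j is the front scan on the reversed lists at m-1-j
theorem foldl_max_out (t : List Int) : ∀ (a x : Int), t.foldl max (max a x) = max (t.foldl max a) x := by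
  induction t with
  | nil => intro a x; rfl
  | cons y t ih =>
    intro a x
    simp only [List.foldl_cons]
    rw [max_right_comm, ih]

theorem foldl_max_reverse (l : List Int) : ∀ (a : Int), l.reverse.foldl max a = l.foldl max a := by
  induction l with
  | nil => intro a; rfl
  | cons x t ih =>
    intro a
    rw [List.reverse_cons, List.foldl_append, ih, List.foldl_cons, List.foldl_cons,
      ← foldl_max_out]
    rfl

theorem range_eq_map_reverse_range' (j m : Nat) (hj : j < m) :
    List.range (m - 1 - j) = ((List.range' (j + 1) (m - 1 - j)).reverse).map (fun k => m - 1 - k) := by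
  apply List.ext_getElem
  · simp
  intro i hi hj'
  simp only [List.length_range, List.length_map, List.length_reverse, List.length_range'] at hi hj'
  simp only [List.getElem_range, List.getElem_map, List.getElem_reverse, List.getElem_range',
    List.length_range']
  omega

theorem growBack_eq (bv dp : List Int) (x : Int) (hlen : dp.length = bv.length)
    (hnn : ∀ v ∈ dp, 0 ≤ v) :
    growBack bv dp x = (growFront bv.reverse dp.reverse x).reverse := by
  have hnnr : ∀ v ∈ dp.reverse, 0 ≤ v := by simpa using hnn
  apply List.ext_getElem
  · simp [growBack, growFront]
  intro j hj hj'
  simp only [growBack, List.length_map, List.length_range] at hj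
  have hjm : j < bv.length := hj
  simp only [growBack, growFront, List.getElem_reverse, List.getElem_map, List.getElem_range,
    List.length_map, List.length_range, List.length_reverse]
  have hb : bv.reverse.getD (bv.length - 1 - j) 0 = bv.getD j 0 := by
    rw [getD_reverse bv _ (by omega) 0]
    congr 1
    omega
  have hd : dp.reverse.getD (bv.length - 1 - j) 0 = dp.getD j 0 := by
    rw [getD_reverse dp _ (by omega) 0, hlen]
    congr 1
    omega
  rw [hb, hd]
  have hidx0 : bv.length - (j + 1) = bv.length - 1 - j := by omega
  rw [hidx0]
  by_cases hx : bv.getD j 0 = x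
  · rw [if_pos hx, if_pos hx]
    congr 2
    -- equality of the two predecessor maxima
    rw [bestBelow_eq_foldl _ _ _ _ hnn, bestBelow_eq_foldl _ _ _ _ hnnr]
    rw [range_eq_map_reverse_range' j bv.length hjm]
    rw [List.filter_map, List.map_map]
    have hmem : ∀ k ∈ (List.range' (j + 1) (bv.length - 1 - j)).reverse, k < bv.length ∧ j + 1 ≤ k := by
      intro k hk
      rw [List.mem_reverse, List.mem_range'_1] at hk
      omega
    have hfilter : (List.range' (j + 1) (bv.length - 1 - j)).reverse.filter
          ((fun k => decide (bv.reverse.getD k 0 < x)) ∘ fun k => bv.length - 1 - k)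
        = (List.range' (j + 1) (bv.length - 1 - j)).reverse.filter (fun k => decide (bv.getD k 0 < x)) := by
      apply List.filter_congr
      intro k hk
      have hkb := hmem k hk
      simp only [Function.comp_apply]
      rw [getD_reverse bv _ (by omega) 0]
      have hidx : bv.length - 1 - (bv.length - 1 - k) = k := by omega
      rw [hidx]
    rw [hfilter]
    have hmap : ((List.range' (j + 1) (bv.length - 1 - j)).reverse.filter (fun k => decide (bv.getD k 0 < x))).map
          ((fun k => dp.reverse.getD k 0) ∘ fun k => bv.length - 1 - k)
        = ((List.range' (j + 1) (bv.length - 1 - j)).reverse.filter (fun k => decide (bv.getD k 0 < x))).map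
          (fun k => dp.getD k 0) := by
      apply List.map_congr_left
      intro k hk
      have hkb := hmem k (List.mem_of_mem_filter hk)
      simp only [Function.comp_apply]
      rw [getD_reverse dp _ (by omega) 0, hlen]
      have hidx : bv.length - 1 - (bv.length - 1 - k) = k := by omega
      rw [hidx]
    rw [hmap, List.filter_reverse, List.map_reverse, foldl_max_reverse]
  · rw [if_neg hx, if_neg hx]

theorem foldl_growFront_eq (bv : List Int) : ∀ (l : List Int) (dp : List Int),
    dp.length = bv.length → (∀ v ∈ dp, 0 ≤ v) →
    l.foldl (fun dp x => growFront bv dp x) dp = l.foldl (fun dp x => lcisInner x bv dp 0) dp := by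
  intro l
  induction l with
  | nil => intro dp _ _; rfl
  | cons x l ih =>
    intro dp hlen hnn
    simp only [List.foldl_cons]
    rw [growFront_eq bv dp x hlen hnn]
    exact ih _ (length_lcisInner _ _ _ _ hlen) (nonneg_lcisInner _ _ _ _ hnn)

theorem foldl_growBack_eq (bv : List Int) : ∀ (l : List Int) (dp : List Int),
    dp.length = bv.length → (∀ v ∈ dp, 0 ≤ v) →
    l.foldl (fun dp x => growBack bv dp x) dp
      = (l.foldl (fun dp x => lcisInner x bv.reverse dp 0) dp.reverse).reverse := by
  intro l
  induction l with
  | nil => intro dp _ _; simp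
  | cons x l ih =>
    intro dp hlen hnn
    simp only [List.foldl_cons]
    rw [growBack_eq bv dp x hlen hnn,
      growFront_eq bv.reverse dp.reverse x (by simp [hlen]) (by simpa using hnn)]
    have hl2 : (lcisInner x bv.reverse dp.reverse 0).length = bv.reverse.length :=
      length_lcisInner _ _ _ _ (by simp [hlen])
    rw [ih _ (by simp [hl2])
      (by simpa using nonneg_lcisInner x bv.reverse dp.reverse 0 (by simpa using hnn))]
    congr 2
    simp

theorem altFront_eq (av bv : List Int) :
    av.foldl (fun dp x => growFront bv dp x) (List.replicate bv.length 0) = lcis av bv := by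
  rw [foldl_growFront_eq bv av _ (by simp) (by simp)]
  rfl

theorem altBack_eq (av bv : List Int) :
    av.reverse.foldl (fun dp x => growBack bv dp x) (List.replicate bv.length 0)
      = (lcis av.reverse bv.reverse).reverse := by
  rw [foldl_growBack_eq bv av.reverse _ (by simp) (by simp)]
  unfold lcis
  congr 2
  simp

-- ===== VERDICT (by name: the statement is the Claim_ definition above) =====
theorem LCBS_spec : Claim_equal_LCBS := by
  intro a b _hdom _hpre
  unfold Spec_LCBS
  simp only [LCBS, LCBS_alt]
  rw [main_eq, altFront_eq, altBack_eq]
  rw [zip_map_eq _ _ _ (by rw [length_lcis]) (by simp [length_lcis])]
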